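-- pv_equiv track=rewrite | github.com/JHNT/ReceiptScanner | OCRScanner2.py | get_word_boundaries
-- ===== SOURCE A (Python) =====
-- def get_word_boundaries(word):
--     b = []
--     for l in word:
--         if not b:
--             b = [l[1], l[2], l[3], l[4]]
--             continue
--         if l[1] < b[0]:
--             b[0] = l[1]
--         if l[2] < b[1]:
--             b[1] = l[2]
--         if l[3] > b[2]:
--             b[2] = l[3]
--         if l[4] > b[3]:
--             b[3] = l[4]
--     return b
-- ===== SOURCE B (Python) =====
-- def get_word_boundaries(word):
--     if not word:
--         return []
--     return [min(l[1] for l in word),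
--             min(l[2] for l in word),
--             max(l[3] for l in word),
--             max(l[4] for l in word)]
-- ===== Notes on version B (the rewrite author's own statement) =====
-- stated objective: simpler
-- what changed: Replaces the single loop maintaining a 4-element accumulator with an empty guard and four independent min/max reductions over the rows.
import Mathlib
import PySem

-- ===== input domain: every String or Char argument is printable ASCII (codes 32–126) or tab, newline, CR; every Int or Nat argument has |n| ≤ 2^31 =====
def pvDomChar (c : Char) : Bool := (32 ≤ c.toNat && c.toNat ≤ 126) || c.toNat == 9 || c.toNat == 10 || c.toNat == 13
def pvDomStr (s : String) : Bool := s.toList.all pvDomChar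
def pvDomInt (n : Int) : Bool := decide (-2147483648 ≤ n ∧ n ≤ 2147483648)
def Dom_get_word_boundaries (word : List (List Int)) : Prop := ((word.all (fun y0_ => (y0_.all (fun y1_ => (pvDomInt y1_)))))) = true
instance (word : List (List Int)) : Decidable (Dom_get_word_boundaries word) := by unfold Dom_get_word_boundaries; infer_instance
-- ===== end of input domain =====

-- B replaces A's single accumulator-maintaining loop by an empty guard and four independent
-- min/max reductions; equal return values on rows of length ≥ 5 (where A does not raise).

-- ===== PORT A =====
-- Python l[i] (raises out of range, excluded by Pre_); default 0 is never reached inside Pre_.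
def pvCell (l : List Int) (i : Int) : Int := (PySem.List.pyGet? l i).getD 0

-- one iteration of A's loop over accumulator b
def pvStepA (b : List Int) (l : List Int) : List Int :=
  if b = [] then [pvCell l 1, pvCell l 2, pvCell l 3, pvCell l 4]
  else match b with
  | [b0, b1, b2, b3] =>
      [if pvCell l 1 < b0 then pvCell l 1 else b0,
       if pvCell l 2 < b1 then pvCell l 2 else b1,
       if pvCell l 3 > b2 then pvCell l 3 else b2,
       if pvCell l 4 > b3 then pvCell l 4 else b3]
  | _ => b

def get_word_boundaries (word : List (List Int)) : List Int :=
  word.foldl pvStepA []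

-- ===== PORT B =====
def get_word_boundaries_alt (word : List (List Int)) : List Int :=
  if word = [] then []
  else
    [(PySem.List.min? (word.map (fun l => pvCell l 1)) (fun x => x)).getD 0,
     (PySem.List.min? (word.map (fun l => pvCell l 2)) (fun x => x)).getD 0,
     (PySem.List.max? (word.map (fun l => pvCell l 3)) (fun x => x)).getD 0,
     (PySem.List.max? (word.map (fun l => pvCell l 4)) (fun x => x)).getD 0]

-- ===== PRECONDITION & SPEC =====
-- A indexes l[1]..l[4] in every row: rows shorter than 5 make Python raise IndexError.
def Pre_get_word_boundaries (word : List (List Int)) : Prop :=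
  ∀ l ∈ word, 5 ≤ l.length
instance (word : List (List Int)) : Decidable (Pre_get_word_boundaries word) := by
  unfold Pre_get_word_boundaries; infer_instance
def pvWitness_get_word_boundaries : List (List Int) := [[9, 1, 2, 3, 4], [8, 0, 5, 2, 9]]

def Spec_get_word_boundaries (word : List (List Int)) (out : List Int) : Prop :=
  out = get_word_boundaries_alt word
instance (word : List (List Int)) (out : List Int) : Decidable (Spec_get_word_boundaries word out) := by
  unfold Spec_get_word_boundaries; infer_instance

-- ===== CLAIM =====
def Claim_equal_get_word_boundaries : Prop := ∀ (word : List (List Int)), Dom_get_word_boundaries word → Pre_get_word_boundaries word → Spec_get_word_boundaries word (get_word_boundaries word)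

-- ===== LEMMAS AND PROOFS =====
theorem pvStepA_quad (b0 b1 b2 b3 : Int) (l : List Int) :
    pvStepA [b0, b1, b2, b3] l =
      [min b0 (pvCell l 1), min b1 (pvCell l 2), max b2 (pvCell l 3), max b3 (pvCell l 4)] := by
  simp only [pvStepA, if_neg (by simp : ¬([b0,b1,b2,b3] : List Int) = [])]
  congr 1 <;> [skip; congr 1] <;> [skip; skip; congr 1] <;>
    simp [min_def, max_def] <;> omega

theorem foldlA_quad (t : List (List Int)) (b0 b1 b2 b3 : Int) :
    t.foldl pvStepA [b0, b1, b2, b3] =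
      [(t.map (fun l => pvCell l 1)).foldl min b0,
       (t.map (fun l => pvCell l 2)).foldl min b1,
       (t.map (fun l => pvCell l 3)).foldl max b2,
       (t.map (fun l => pvCell l 4)).foldl max b3] := by
  induction t generalizing b0 b1 b2 b3 with
  | nil => simp
  | cons h t ih => simp [List.foldl_cons, pvStepA_quad, ih]

-- ===== VERDICT =====
theorem get_word_boundaries_spec : Claim_equal_get_word_boundaries := by
  intro word _ _
  unfold Spec_get_word_boundaries get_word_boundaries get_word_boundaries_alt
  cases word with
  | nil => simp
  | cons h t =>
      simp only [List.foldl_cons, pvStepA, if_true, List.map_cons,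
        PySem.List.min?_id_cons, PySem.List.max?_id_cons, if_neg (List.cons_ne_nil h t),
        Option.getD_some, foldlA_quad]
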